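-- pv_equiv track=rewrite | github.com/joaoppm3/gustavoejoao | funcoes.py | calcula_pontos_sequencia_alta
-- ===== SOURCE A (Python) =====
-- def calcula_pontos_sequencia_alta(dados):
--     for i in range(len(dados)):
--         if dados[i] + 1 in dados:
--             if dados[i] + 2 in dados:
--                 if dados[i] + 3 in dados:
--                     if dados[i] + 4 in dados:
--                         return 30
--     return 0
-- ===== SOURCE B (Python) =====
-- def calcula_pontos_sequencia_alta(dados):
--     vals = sorted(set(dados))
--     run = 0
--     prev = None
--     for v in vals:
--         if prev is not None and v - prev == 1:
--             run += 1
--         else: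
--             run = 1
--         if run >= 5:
--             return 30
--         prev = v
--     return 0
-- ===== Notes on version B (the rewrite author's own statement) =====
-- stated objective: faster
-- what changed: Replaced the quadratic loop of repeated list-membership scans by sorting the deduplicated values once and making a single linear pass that tracks the current run length of consecutive integers.
import Mathlib
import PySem

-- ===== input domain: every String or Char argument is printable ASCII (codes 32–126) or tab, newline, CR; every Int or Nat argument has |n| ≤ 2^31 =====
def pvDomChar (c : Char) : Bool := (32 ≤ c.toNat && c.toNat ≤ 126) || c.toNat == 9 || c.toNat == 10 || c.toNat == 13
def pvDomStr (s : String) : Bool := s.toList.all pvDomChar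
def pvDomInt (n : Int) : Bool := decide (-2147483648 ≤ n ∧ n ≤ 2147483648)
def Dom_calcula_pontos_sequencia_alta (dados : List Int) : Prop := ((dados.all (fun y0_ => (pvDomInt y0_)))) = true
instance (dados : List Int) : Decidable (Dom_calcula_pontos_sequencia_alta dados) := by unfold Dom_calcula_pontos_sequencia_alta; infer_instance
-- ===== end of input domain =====

-- B sorts the deduplicated values once and makes a single pass tracking the run of
-- consecutive integers, instead of A's repeated membership scans (objective: faster).


-- ===== PORT A =====
-- the 'for i in range(len(dados))' loop with early return 30
def pvALoop (dados : List Int) : List Int → Int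
  | [] => 0
  | i :: rest =>
    if PySem.List.pyGetD dados i 0 + 1 ∈ dados then
      if PySem.List.pyGetD dados i 0 + 2 ∈ dados then
        if PySem.List.pyGetD dados i 0 + 3 ∈ dados then
          if PySem.List.pyGetD dados i 0 + 4 ∈ dados then 30
          else pvALoop dados rest
        else pvALoop dados rest
      else pvALoop dados rest
    else pvALoop dados rest

def calcula_pontos_sequencia_alta (dados : List Int) : Int :=
  pvALoop dados (PySem.List.pyRange 0 dados.length 1)

-- ===== PORT B =====
-- the 'for v in vals' loop of Source B with state (prev, run) and early return 30
def pvBLoop (prev : Option Int) (run : Int) : List Int → Int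
  | [] => 0
  | v :: rest =>
    let run' := match prev with
      | some p => if v - p = 1 then run + 1 else 1
      | none => 1
    if 5 ≤ run' then 30 else pvBLoop (some v) run' rest

def calcula_pontos_sequencia_alta_alt (dados : List Int) : Int :=
  pvBLoop none 0 (PySem.List.sorted (PySem.Set.ofList dados) (fun x => x) false)

-- ===== PRECONDITION & SPEC =====
def Spec_calcula_pontos_sequencia_alta (dados : List Int) (out : Int) : Prop := out = calcula_pontos_sequencia_alta_alt dados
instance (dados : List Int) (out : Int) : Decidable (Spec_calcula_pontos_sequencia_alta dados out) := by unfold Spec_calcula_pontos_sequencia_alta; infer_instance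

-- ===== CLAIM (what is proved, stated in full; the proofs are below) =====
def Claim_equal_calcula_pontos_sequencia_alta : Prop := ∀ (dados : List Int), Dom_calcula_pontos_sequencia_alta dados → Spec_calcula_pontos_sequencia_alta dados (calcula_pontos_sequencia_alta dados)

-- ===== LEMMAS AND PROOFS =====

-- "x starts a run of 5 values all present in L"
def pvHas5 (L : List Int) : Prop :=
  ∃ x, x ∈ L ∧ x + 1 ∈ L ∧ x + 2 ∈ L ∧ x + 3 ∈ L ∧ x + 4 ∈ L

-- generalized membership for the B-loop invariant: the trailing run [p-r+1, p] or the remaining list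
def pvW (p r : Int) (L : List Int) (z : Int) : Prop := (p - r + 1 ≤ z ∧ z ≤ p) ∨ z ∈ L

lemma pvALoop_eq_30_iff (dados idxs : List Int) :
    pvALoop dados idxs = 30 ↔
      ∃ i ∈ idxs, (PySem.List.pyGetD dados i 0 + 1 ∈ dados ∧ PySem.List.pyGetD dados i 0 + 2 ∈ dados ∧
        PySem.List.pyGetD dados i 0 + 3 ∈ dados ∧ PySem.List.pyGetD dados i 0 + 4 ∈ dados) := by
  induction idxs with
  | nil => simp [pvALoop]
  | cons i rest ih =>
    simp only [pvALoop, List.mem_cons]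
    split_ifs with h1 h2 h3 h4 <;> simp_all

lemma pvBLoop_eq_30_iff (L : List Int) : ∀ p r : Int,
    L.Pairwise (· < ·) → (∀ y ∈ L, p < y) → 1 ≤ r → r ≤ 4 →
    (pvBLoop (some p) r L = 30 ↔
      ∃ x, pvW p r L x ∧ pvW p r L (x+1) ∧ pvW p r L (x+2) ∧ pvW p r L (x+3) ∧ pvW p r L (x+4)) := by
  induction L with
  | nil =>
    intro p r _ _ hr1 hr4
    simp only [pvBLoop, pvW, List.not_mem_nil, or_false]
    constructor
    · intro h; omega
    · rintro ⟨x, h0, h1, h2, h3, h4⟩; omega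
  | cons v rest ih =>
    intro p r hpw hgt hr1 hr4
    have hvgt : p < v := hgt v (List.mem_cons_self ..)
    have hrest_pw : rest.Pairwise (· < ·) := (List.pairwise_cons.mp hpw).2
    have hrest_gt : ∀ y ∈ rest, v < y := (List.pairwise_cons.mp hpw).1
    by_cases hv : v - p = 1
    · -- consecutive: run increments
      by_cases hrun : (5 : Int) ≤ r + 1
      · -- returns 30; exhibit the witness v - 4
        have hr : r = 4 := by omega
        have h30 : pvBLoop (some p) r (v :: rest) = 30 := by
          simp [pvBLoop, hv, hrun]
        rw [h30]
        constructor
        · intro _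
          refine ⟨v - 4, Or.inl (by omega), Or.inl (by omega), Or.inl (by omega),
            Or.inl (by omega), Or.inr ?_⟩
          have hev : v - 4 + 4 = v := by omega
          rw [hev]; exact List.mem_cons_self ..
        · intro _; rfl
      · -- recurse with state (v, r+1)
        have step : pvBLoop (some p) r (v :: rest) = pvBLoop (some v) (r+1) rest := by
          simp [pvBLoop, hv, hrun]
        rw [step, ih v (r+1) hrest_pw hrest_gt (by omega) (by omega)]
        -- pvW v (r+1) rest = pvW p r (v :: rest) pointwise (v = p + 1)
        have hW : ∀ z, pvW v (r+1) rest z ↔ pvW p r (v :: rest) z := by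
          intro z
          simp only [pvW, List.mem_cons]
          constructor
          · rintro (h | h) <;> [skip; exact Or.inr (Or.inr h)]; omega
          · rintro (h | h | h)
            · left; omega
            · left; omega
            · right; exact h
        constructor
        · rintro ⟨x, h0, h1, h2, h3, h4⟩
          exact ⟨x, (hW _).mp h0, (hW _).mp h1, (hW _).mp h2, (hW _).mp h3, (hW _).mp h4⟩
        · rintro ⟨x, h0, h1, h2, h3, h4⟩
          exact ⟨x, (hW _).mpr h0, (hW _).mpr h1, (hW _).mpr h2, (hW _).mpr h3, (hW _).mpr h4⟩
    · -- gap: run resets to 1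
      have hgap : p + 1 < v := by omega
      have step : pvBLoop (some p) r (v :: rest) = pvBLoop (some v) 1 rest := by
        simp [pvBLoop, hv]
      rw [step, ih v 1 hrest_pw hrest_gt (by omega) (by omega)]
      constructor
      · rintro ⟨x, h0, h1, h2, h3, h4⟩
        have up : ∀ z, pvW v 1 rest z → pvW p r (v :: rest) z := by
          intro z hz
          rcases hz with h | h
          · right
            have hzv : z = v := by omega
            rw [hzv]; exact List.mem_cons_self ..
          · right; exact List.mem_cons_of_mem _ h
        exact ⟨x, up _ h0, up _ h1, up _ h2, up _ h3, up _ h4⟩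
      · -- any witness must lie entirely above p: the gap p+1 is missing
        rintro ⟨x, h0, h1, h2, h3, h4⟩
        -- weaken memberships to linear bounds
        have bnd : ∀ z, pvW p r (v :: rest) z → (p - r + 1 ≤ z ∧ z ≤ p) ∨ z = v ∨ v < z := by
          intro z hz
          rcases hz with h | h
          · exact Or.inl h
          · rcases List.mem_cons.mp h with h | h
            · exact Or.inr (Or.inl h)
            · exact Or.inr (Or.inr (hrest_gt z h))
        have b0 := bnd _ h0; have b1 := bnd _ h1; have b2 := bnd _ h2
        have b3 := bnd _ h3; have b4 := bnd _ h4
        have hx : p < x := by omega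
        have conv : ∀ z, pvW p r (v :: rest) z → p < z → pvW v 1 rest z := by
          intro z hz hpz
          rcases hz with h | h
          · omega
          · rcases List.mem_cons.mp h with h | h
            · left; omega
            · right; exact h
        exact ⟨x, conv _ h0 (by omega), conv _ h1 (by omega), conv _ h2 (by omega),
          conv _ h3 (by omega), conv _ h4 (by omega)⟩

lemma pvBLoop_zero_or_30 (L : List Int) : ∀ prev run,
    pvBLoop prev run L = 0 ∨ pvBLoop prev run L = 30 := by
  induction L with
  | nil => intro prev run; left; rfl
  | cons v rest ih =>
    intro prev run
    simp only [pvBLoop]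
    split_ifs
    · right; rfl
    · exact ih _ _

lemma pvALoop_zero_or_30 (dados : List Int) (idxs : List Int) :
    pvALoop dados idxs = 0 ∨ pvALoop dados idxs = 30 := by
  induction idxs with
  | nil => left; rfl
  | cons i rest ih =>
    simp only [pvALoop]
    split_ifs <;> first | (right; rfl) | exact ih

lemma a_eq_30_iff (dados : List Int) :
    calcula_pontos_sequencia_alta dados = 30 ↔ pvHas5 dados := by
  rw [calcula_pontos_sequencia_alta, pvALoop_eq_30_iff, pvHas5]
  constructor
  · rintro ⟨i, hi, h1, h2, h3, h4⟩
    refine ⟨PySem.List.pyGetD dados i 0, ?_, h1, h2, h3, h4⟩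
    rcases PySem.List.mem_pyRange_one.mp hi with ⟨hi0, hilen⟩
    exact PySem.List.pyGetD_mem (xs := dados) (i := i) (d := 0)
      (by simp [PySem.Raise.InRange]; omega)
  · rintro ⟨x, hx, h1, h2, h3, h4⟩
    rcases List.getElem_of_mem hx with ⟨n, hn, rfl⟩
    refine ⟨(n : Int), PySem.List.mem_pyRange_one.mpr ⟨by omega, by exact_mod_cast hn⟩, ?_⟩
    rw [PySem.List.pyGetD_natCast, List.getD_eq_getElem?_getD, List.getElem?_eq_getElem hn,
      Option.getD_some]
    exact ⟨h1, h2, h3, h4⟩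

lemma b_eq_30_iff (dados : List Int) :
    calcula_pontos_sequencia_alta_alt dados = 30 ↔ pvHas5 dados := by
  rw [calcula_pontos_sequencia_alta_alt]
  have hmem : ∀ z : Int, z ∈ PySem.List.sorted (PySem.Set.ofList dados) (fun x => x) false ↔ z ∈ dados := by
    intro z
    rw [PySem.List.mem_sorted, PySem.Set.mem_ofList]
  have hpw := PySem.List.sorted_ofList_pairwise_lt (xs := dados)
  cases hL : PySem.List.sorted (PySem.Set.ofList dados) (fun x => x) false with
  | nil =>
    simp only [pvBLoop]
    constructor
    · intro h; omega
    · rintro ⟨x, hx, -⟩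
      rw [← hmem, hL] at hx
      simp at hx
  | cons v rest =>
    rw [hL] at hpw hmem
    have step : pvBLoop none 0 (v :: rest) = pvBLoop (some v) 1 rest := by
      simp [pvBLoop]
    rw [step, pvBLoop_eq_30_iff rest v 1 (List.pairwise_cons.mp hpw).2
      (List.pairwise_cons.mp hpw).1 (by omega) (by omega), pvHas5]
    have hW : ∀ z, pvW v 1 rest z ↔ z ∈ dados := by
      intro z
      rw [← hmem z]
      simp only [pvW, List.mem_cons]
      constructor
      · rintro (h | h)
        · left; omega
        · right; exact h
      · rintro (h | h)
        · left; omega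
        · right; exact h
    constructor
    · rintro ⟨x, h0, h1, h2, h3, h4⟩
      exact ⟨x, (hW _).mp h0, (hW _).mp h1, (hW _).mp h2, (hW _).mp h3, (hW _).mp h4⟩
    · rintro ⟨x, h0, h1, h2, h3, h4⟩
      exact ⟨x, (hW _).mpr h0, (hW _).mpr h1, (hW _).mpr h2, (hW _).mpr h3, (hW _).mpr h4⟩

-- ===== VERDICT (by name: the statement is the Claim_ definition above) =====
theorem calcula_pontos_sequencia_alta_spec : Claim_equal_calcula_pontos_sequencia_alta := by
  intro dados _
  unfold Spec_calcula_pontos_sequencia_alta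
  by_cases h : pvHas5 dados
  · rw [(a_eq_30_iff dados).mpr h, (b_eq_30_iff dados).mpr h]
  · have ha : calcula_pontos_sequencia_alta dados = 0 := by
      rcases pvALoop_zero_or_30 dados (PySem.List.pyRange 0 dados.length 1) with h0 | h30
      · exact h0
      · exact absurd ((a_eq_30_iff dados).mp h30) h
    have hb : calcula_pontos_sequencia_alta_alt dados = 0 := by
      rcases pvBLoop_zero_or_30 _ none 0 with h0 | h30
      · exact h0
      · exact absurd ((b_eq_30_iff dados).mp h30) h
    rw [ha, hb]
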